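-- pv_equiv track=rewrite | github.com/KiyoungLee73/do-python | Sample/Sample181Best/stick/Stick.py | getNumberOfStickForPyramid
-- ===== SOURCE A (Python) =====
-- def getNumberOfStickForPyramid(numberOfLayers) :
--     numberOfStickForPyramid = 0
--     ########################여기부터 구현 (2) ---------------->
--     totalSum = 0
--     sum = 0
--     for i in range(1,numberOfLayers+1):
--         totalSum += 3 + (2 * i - 2) * 2
--         if i <= numberOfLayers-1:
--             sum += i
--     numberOfStickForPyramid = totalSum - sum
--     ############################# <-------------- 여기까지 구현 (2)
--     return numberOfStickForPyramid
-- ===== SOURCE B (Python) =====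
-- def getNumberOfStickForPyramid(numberOfLayers):
--     if numberOfLayers <= 0:
--         return 0
--     return 3 * numberOfLayers * (numberOfLayers + 1) // 2
-- ===== Notes on version B (the rewrite author's own statement) =====
-- stated objective: faster
-- what changed: replaced the loop accumulating two running sums with a single closed-form arithmetic-series expression (and zero for non-positive layer counts)
import Mathlib
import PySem

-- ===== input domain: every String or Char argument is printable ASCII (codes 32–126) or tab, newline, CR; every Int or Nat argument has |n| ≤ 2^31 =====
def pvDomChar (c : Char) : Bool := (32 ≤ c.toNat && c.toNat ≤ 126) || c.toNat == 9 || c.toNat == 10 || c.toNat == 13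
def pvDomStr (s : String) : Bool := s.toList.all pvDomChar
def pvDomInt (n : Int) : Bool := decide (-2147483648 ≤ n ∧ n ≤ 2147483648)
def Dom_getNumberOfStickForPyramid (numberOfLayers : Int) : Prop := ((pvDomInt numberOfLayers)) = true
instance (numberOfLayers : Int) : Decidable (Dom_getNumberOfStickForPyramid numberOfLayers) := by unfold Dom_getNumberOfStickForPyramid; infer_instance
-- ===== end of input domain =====

-- B replaces A's linear two-accumulator loop with a closed-form arithmetic-series expression (faster).
-- ===== PORT A =====
def getNumberOfStickForPyramid (numberOfLayers : Int) : Int :=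
  -- numberOfStickForPyramid = 0; totalSum = 0; sum = 0
  let st :=
    (PySem.List.pyRange 1 (numberOfLayers + 1) 1).foldl
      (fun (p : Int × Int) i =>
        (p.1 + 3 + (2 * i - 2) * 2,
         if i ≤ numberOfLayers - 1 then p.2 + i else p.2))
      (0, 0)
  st.1 - st.2

-- ===== PORT B =====
def getNumberOfStickForPyramid_alt (numberOfLayers : Int) : Int :=
  if numberOfLayers ≤ 0 then 0
  else PySem.Int.floordiv (3 * numberOfLayers * (numberOfLayers + 1)) 2

-- ===== PRECONDITION & SPEC =====
def Spec_getNumberOfStickForPyramid (numberOfLayers : Int) (out : Int) : Prop := out = getNumberOfStickForPyramid_alt numberOfLayers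
instance (numberOfLayers : Int) (out : Int) : Decidable (Spec_getNumberOfStickForPyramid numberOfLayers out) := by unfold Spec_getNumberOfStickForPyramid; infer_instance

-- ===== CLAIM (what is proved, stated in full; the proofs are below) =====
def Claim_equal_getNumberOfStickForPyramid : Prop := ∀ (numberOfLayers : Int), Dom_getNumberOfStickForPyramid numberOfLayers → Spec_getNumberOfStickForPyramid numberOfLayers (getNumberOfStickForPyramid numberOfLayers)

-- ===== LEMMAS AND PROOFS =====

-- ===== VERDICT (by name: the statement is the Claim_ definition above) =====
-- pair fold splits into two independent folds
theorem foldl_prod_split (xs : List Int) (f g : Int → Int → Int) :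
    ∀ (t s : Int),
      xs.foldl (fun (p : Int × Int) i => (f p.1 i, g p.2 i)) (t, s)
        = (xs.foldl f t, xs.foldl g s) := by
  induction xs with
  | nil => intro t s; rfl
  | cons x xs ih => intro t s; simp [List.foldl, ih]

theorem total_closed (k : Nat) :
    (PySem.List.pyRange 1 ((k : Int) + 1) 1).foldl
        (fun t i => t + 3 + (2 * i - 2) * 2) 0
      = 2 * (k : Int) ^ 2 + k := by
  induction k with
  | zero => norm_num
  | succ m ih =>
    have h : PySem.List.pyRange 1 ((m : Int) + 1 + 1) 1
        = PySem.List.pyRange 1 ((m : Int) + 1) 1 ++ [(m : Int) + 1] :=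
      PySem.List.pyRange_one_succ_right (by omega)
    push_cast
    rw [h, List.foldl_append]
    push_cast at ih
    rw [ih]
    simp [List.foldl]
    ring

theorem gauss2 (k : Nat) :
    2 * (PySem.List.pyRange 1 ((k : Int) + 1) 1).foldl (fun s i => s + i) 0
      = (k : Int) * ((k : Int) + 1) := by
  induction k with
  | zero => norm_num
  | succ m ih =>
    have h : PySem.List.pyRange 1 ((m : Int) + 1 + 1) 1
        = PySem.List.pyRange 1 ((m : Int) + 1) 1 ++ [(m : Int) + 1] :=
      PySem.List.pyRange_one_succ_right (by omega)
    push_cast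
    rw [h, List.foldl_append]
    simp only [List.foldl]
    push_cast at ih
    linear_combination ih

theorem sum_closed2 (k : Nat) (hk : 1 ≤ k) :
    2 * (PySem.List.pyRange 1 ((k : Int) + 1) 1).foldl
        (fun s i => if i ≤ (k : Int) - 1 then s + i else s) 0
      = ((k : Int) - 1) * k := by
  have h : PySem.List.pyRange 1 ((k : Int) + 1) 1
      = PySem.List.pyRange 1 (k : Int) 1 ++ [(k : Int)] :=
    PySem.List.pyRange_one_succ_right (by exact_mod_cast hk)
  rw [h, List.foldl_append]
  have hcong : (PySem.List.pyRange 1 (k : Int) 1).foldl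
      (fun s i => if i ≤ (k : Int) - 1 then s + i else s) 0
      = (PySem.List.pyRange 1 (k : Int) 1).foldl (fun s i => s + i) 0 := by
    apply PySem.List.foldl_congr_mem
    intro acc x hx
    have := (PySem.List.mem_pyRange_one).1 hx
    rw [if_pos (by omega)]
  rw [hcong]
  simp only [List.foldl]
  rw [if_neg (by omega)]
  have := gauss2 (k - 1)
  have hk1 : ((k - 1 : Nat) : Int) = (k : Int) - 1 := by omega
  rw [hk1] at this
  rw [show ((k : Int) - 1) + 1 = (k : Int) by ring] at this
  linear_combination this

theorem getNumberOfStickForPyramid_spec : Claim_equal_getNumberOfStickForPyramid := by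
  intro n _
  unfold Spec_getNumberOfStickForPyramid getNumberOfStickForPyramid getNumberOfStickForPyramid_alt
  by_cases hn : n ≤ 0
  · have h0 : PySem.List.pyRange 1 (n + 1) 1 = [] := by
      simp [PySem.List.pyRange]; omega
    simp [h0, hn]
  · rw [not_le] at hn
    rw [if_neg (by omega)]
    obtain ⟨k, hk, hk1⟩ : ∃ k : Nat, n = (k : Int) ∧ 1 ≤ k :=
      ⟨n.toNat, by omega, by omega⟩
    subst hk
    simp only
    rw [foldl_prod_split _ (fun t i => t + 3 + (2 * i - 2) * 2)
        (fun s i => if i ≤ (k : Int) - 1 then s + i else s)]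
    simp only
    rw [total_closed k]
    have hS := sum_closed2 k hk1
    rw [PySem.Int.floordiv_eq_ediv_of_pos (by norm_num)]
    have key : 3 * (k : Int) * ((k : Int) + 1)
        = 2 * (2 * (k : Int) ^ 2 + (k : Int)
            - (PySem.List.pyRange 1 ((k : Int) + 1) 1).foldl
                (fun s i => if i ≤ (k : Int) - 1 then s + i else s) 0) := by
      linear_combination hS
    rw [key, Int.mul_ediv_cancel_left _ (by norm_num)]
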